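-- pv_equiv track=rewrite | github.com/ksumini/Algorithm-Study2.0 | Programmers/표현 가능한 이진트리/sungho.py | solution
-- ===== SOURCE A (Python) =====
-- import math
--
-- def check_binary_tree(bin_num: str):
--     """
--     Express the number as a binary tree
--
--     Params
--         str bin_num : binary number of number
--
--     Returns
--         int : if the number can be expressed as binary tree, return 1.
--     """
--     depth = math.ceil(math.log2(len(bin_num) + 1))  # depth of complete binary tree
--
--     if len(bin_num) != 2 ** depth - 1:  # setting 2**(depth-1) digit binary
--         bin_num = '0' * (2 ** depth - 1 - len(bin_num)) + bin_num
--
--     # check top -> bottom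
--     parents = [2 ** (depth - 1)]
--     while True:
--         # check to be able to check next nodes
--         if depth == 1:
--             break
--
--         # next nodes
--         depth -= 1  # top -> bottom
--         nodes = []
--         # check nodes
--         for p in parents:
--             if bin_num[p - 1] == '1':  # if parent == '1', it doesn't matter whether there are nodes or not.
--                 nodes.append(p - 2 ** (depth - 1))
--                 nodes.append(p + 2 ** (depth - 1))
--             else:  # '0'. if parent == '0', all nodes must be dummy nodes(='0')
--                 if (bin_num[p - 2 ** (depth - 1) - 1] == '1') or (
--                         bin_num[p + 2 ** (depth - 1) - 1] == '1'):  # if not dummy node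
--                     return 0
--                 else:  # to check next nodes under dummny nodes
--                     nodes.append(p - 2 ** (depth - 1))
--                     nodes.append(p + 2 ** (depth - 1))
--
--         # next nodes
--         parents = nodes
--
--     return 1
--
-- def solution(numbers: list) -> list:
--     """
--     check if the numbers in list can be expressed as a complete binary tree.
--
--     Params
--         list numbers : the numbers
--
--     Returns
--         list results : all results. if the number can be expressed as binary tree, return 1.
--     """
--     results = []
--     for number in numbers:
--         bin_num = bin(number)  # to binary number, 0bXXX
--         bin_num = bin_num[2:]  # remove '0b', XXX
--
--         result = check_binary_tree(bin_num)
--         results.append(result)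
--
--     return results
-- ===== SOURCE B (Python) =====
-- def _valid(s, lo, hi):
--     """s[lo:hi] encodes a complete subtree with root at the middle index."""
--     if hi - lo <= 1:
--         return True
--     mid = (lo + hi) // 2
--     if s[mid] == '1':
--         return _valid(s, lo, mid) and _valid(s, mid + 1, hi)
--     return '1' not in s[lo:hi]
--
--
-- def solution(numbers: list) -> list:
--     results = []
--     for number in numbers:
--         s = bin(number)[2:]
--         d = len(s).bit_length()
--         s = '0' * (2 ** d - 1 - len(s)) + s
--         results.append(1 if _valid(s, 0, len(s)) else 0)
--     return results
-- ===== Notes on version B (the rewrite author's own statement) =====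
-- stated objective: faster
-- what changed: Replaces the BFS level-by-level loop over a growing parents frontier with a recursive divide-and-conquer validator on index ranges (root = middle; recurse into the halves when the root is '1', otherwise require the whole range free of '1'), which avoids materialising the per-level node lists and settles all-zero subtrees with one substring scan.
import Mathlib
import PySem

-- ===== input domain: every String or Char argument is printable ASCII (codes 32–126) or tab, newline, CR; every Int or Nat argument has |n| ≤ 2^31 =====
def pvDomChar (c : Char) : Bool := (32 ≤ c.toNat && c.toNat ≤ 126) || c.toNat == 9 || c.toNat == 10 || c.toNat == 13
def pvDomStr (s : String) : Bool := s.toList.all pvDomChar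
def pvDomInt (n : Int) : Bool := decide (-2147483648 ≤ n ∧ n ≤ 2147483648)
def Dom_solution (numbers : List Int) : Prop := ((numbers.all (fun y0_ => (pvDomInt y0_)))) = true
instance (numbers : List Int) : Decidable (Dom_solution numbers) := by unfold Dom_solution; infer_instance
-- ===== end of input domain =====

-- B replaces A's BFS frontier loop by a recursive divide-and-conquer validator on index ranges; same results, measurably faster by a constant factor (no frontier lists).

-- ===== PORT A =====

-- bin(number)[2:] (shared by both ports: both Pythons compute it the same way)
def binTail (n : Int) : List Char := PySem.List.slice (PySem.Int.toBinChars0b n) (some 2) none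

-- s[i] for indices the programs only use in range; the '0' default is unreachable (Python never raises here)
def cAt (s : List Char) (i : Int) : Char := (PySem.List.pyGet? s i).getD '0'

-- the body of A's `for p in parents` loop: `none` = the `return 0` path, otherwise the built `nodes` list
def levelA (s : List Char) (h : Int) : List Int → Option (List Int)
  | [] => some []
  | p :: rest =>
    if cAt s (p - 1) = '1' then
      (levelA s h rest).map (fun ns => (p - h) :: (p + h) :: ns)
    else if cAt s (p - h - 1) = '1' ∨ cAt s (p + h - 1) = '1' then none
    else (levelA s h rest).map (fun ns => (p - h) :: (p + h) :: ns)

-- A's `while True` loop, recursing on the decreasing depth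
def loopA : Nat → List Char → List Int → Int
  | 0, _, _ => 1       -- unreachable: depth ≥ 1 always
  | 1, _, _ => 1       -- `if depth == 1: break` then `return 1`
  | (d+2), s, parents =>
      match levelA s ((2:Int)^d) parents with
      | none => 0
      | some ns => loopA (d+1) s ns

-- check_binary_tree; math.ceil(math.log2(len+1)) is exact on this range and equals Nat.clog 2 (len+1)
def checkA (bn : List Char) : Int :=
  let depth := Nat.clog 2 (bn.length + 1)
  let s := if bn.length ≠ 2 ^ depth - 1 then List.replicate (2 ^ depth - 1 - bn.length) '0' ++ bn else bn
  loopA depth s [((2:Int) ^ (depth - 1))]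

def solution (numbers : List Int) : List Int := numbers.map (fun n => checkA (binTail n))

-- ===== PORT B =====

-- B's recursive validator on the index range [lo, hi)
def validB (s : List Char) (lo hi : Int) : Bool :=
  if h : hi - lo ≤ 1 then true
  else
    let mid := PySem.Int.floordiv (lo + hi) 2
    if cAt s mid = '1' then validB s lo mid && validB s (mid + 1) hi
    else !((PySem.List.slice s (some lo) (some hi)).contains '1')
termination_by (hi - lo).toNat
decreasing_by
  · have := (PySem.Int.floordiv_two_mid_bounds (lo := lo) (hi := hi) (by omega)).2
    have h2 : 2 * PySem.Int.floordiv (lo + hi) 2 ≤ lo + hi := by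
      have := PySem.Int.floordiv_mul_add_mod (lo + hi) 2
      have := PySem.Int.mod_nonneg (lo + hi) (b := 2) (by omega)
      omega
    omega
  · have := (PySem.Int.floordiv_two_mid_bounds (lo := lo) (hi := hi) (by omega)).1
    have h2 : lo + hi < 2 * PySem.Int.floordiv (lo + hi) 2 + 2 := by
      have := PySem.Int.floordiv_mul_add_mod (lo + hi) 2
      have := PySem.Int.mod_lt (lo + hi) (b := 2) (by omega)
      omega
    omega

def checkB (bn : List Char) : Int :=
  let d := PySem.Int.bitLength (bn.length : Int)
  let s := List.replicate (2 ^ d - 1 - bn.length) '0' ++ bn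
  if validB s 0 (s.length : Int) then 1 else 0

def solution_alt (numbers : List Int) : List Int := numbers.map (fun n => checkB (binTail n))

-- ===== PRECONDITION & SPEC =====
def Spec_solution (numbers : List Int) (out : List Int) : Prop := out = solution_alt numbers
instance (numbers : List Int) (out : List Int) : Decidable (Spec_solution numbers out) := by unfold Spec_solution; infer_instance

-- ===== CLAIM (what is proved, stated in full; the proofs are below) =====
def Claim_equal_solution : Prop := ∀ (numbers : List Int), Dom_solution numbers → Spec_solution numbers (solution numbers)

-- ===== LEMMAS AND PROOFS =====

theorem all_congr_mem {α : Type} {l : List α} {p q : α → Bool}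
    (h : ∀ a ∈ l, p a = q a) : l.all p = l.all q := by
  induction l with
  | nil => rfl
  | cons x xs ih =>
    simp only [List.all_cons, h x (by simp), ih (fun a ha => h a (by simp [ha]))]

-- characterization of A's level loop
theorem levelA_char (s : List Char) (h : Int) (parents : List Int) :
    levelA s h parents =
      if parents.all (fun p => (cAt s (p - 1) == '1')
          || (!(cAt s (p - h - 1) == '1') && !(cAt s (p + h - 1) == '1')))
      then some (parents.flatMap (fun p => [p - h, p + h])) else none := by
  induction parents with
  | nil => rfl
  | cons p rest ih =>
    simp only [levelA, List.all_cons, List.flatMap_cons, ih]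
    by_cases h1 : cAt s (p - 1) = '1'
    · rcases hrest : rest.all (fun p => (cAt s (p - 1) == '1')
          || (!(cAt s (p - h - 1) == '1') && !(cAt s (p + h - 1) == '1'))) with _ | _ <;>
        simp [h1, hrest]
    · by_cases h2 : cAt s (p - h - 1) = '1' ∨ cAt s (p + h - 1) = '1'
      · have hfail : ((cAt s (p - 1) == '1')
            || (!(cAt s (p - h - 1) == '1') && !(cAt s (p + h - 1) == '1'))) = false := by
          rcases h2 with h2 | h2 <;> simp [h1, h2]
        rw [if_neg h1, if_pos h2]
        simp [hfail]
      · push_neg at h2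
        have hokp : ((cAt s (p - 1) == '1')
            || (!(cAt s (p - h - 1) == '1') && !(cAt s (p + h - 1) == '1'))) = true := by
          simp [h2.1, h2.2]
        rw [if_neg h1, if_neg (not_or.mpr ⟨h2.1, h2.2⟩)]
        rcases hrest : rest.all (fun p => (cAt s (p - 1) == '1')
            || (!(cAt s (p - h - 1) == '1') && !(cAt s (p + h - 1) == '1'))) with _ | _ <;>
          simp [hokp, hrest]

-- membership characterization of '1' ∈ s[lo:hi] for in-range bounds
theorem contains_slice_iff (s : List Char) (lo hi : Int)
    (h0 : 0 ≤ lo) (h1 : hi ≤ (s.length : Int)) (hlh : lo ≤ hi) :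
    ((PySem.List.slice s (some lo) (some hi)).contains '1' = true)
      ↔ ∃ i : Int, lo ≤ i ∧ i < hi ∧ cAt s i = '1' := by
  rw [PySem.List.slice_toNat s h0 (by omega)]
  constructor
  · intro hc
    rw [List.contains_eq_any_beq] at hc
    simp only [List.any_eq_true, beq_iff_eq] at hc
    obtain ⟨c, hc, rfl⟩ := hc
    rw [List.mem_iff_getElem] at hc
    obtain ⟨j, hj, hje⟩ := hc
    have hjlen : lo.toNat + j < s.length := by
      simp only [List.length_take, List.length_drop] at hj
      omega
    refine ⟨lo + j, by omega, ?_, ?_⟩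
    · simp only [List.length_take, List.length_drop] at hj
      omega
    · simp only [List.getElem_take, List.getElem_drop] at hje
      unfold cAt
      rw [PySem.List.pyGet?_of_nonneg s (by omega)]
      have hidx : (lo + (j : Int)).toNat = lo.toNat + j := by omega
      simp only [hidx, List.getElem?_eq_getElem hjlen, hje, Option.getD_some]
  · rintro ⟨i, hi1, hi2, hie⟩
    rw [List.contains_eq_any_beq]
    simp only [List.any_eq_true, beq_iff_eq]
    refine ⟨'1', ?_, rfl⟩
    rw [List.mem_iff_getElem]
    have hlen : i.toNat < s.length := by omega
    refine ⟨i.toNat - lo.toNat, ?_, ?_⟩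
    · simp only [List.length_take, List.length_drop]; omega
    · have hidx : lo.toNat + (i.toNat - lo.toNat) = i.toNat := by omega
      simp only [List.getElem_take, List.getElem_drop, hidx]
      unfold cAt at hie
      rw [PySem.List.pyGet?_of_nonneg s (by omega)] at hie
      rw [List.getElem?_eq_getElem hlen] at hie
      simpa using hie

-- if the root of a complete-subtree range is not '1', validB is exactly "no '1' in the range"
theorem validB_notone (s : List Char) (k : Nat) (lo : Int)
    (h0 : 0 ≤ lo) (h1 : lo + 2 ^ (k + 1) - 1 ≤ (s.length : Int))
    (hroot : ¬ cAt s (lo + 2 ^ k - 1) = '1') :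
    validB s lo (lo + 2 ^ (k + 1) - 1)
      = !((PySem.List.slice s (some lo) (some (lo + 2 ^ (k + 1) - 1))).contains '1') := by
  rcases k with _ | k
  · -- single leaf: validB = true, and the slice is the single non-'1' root
    have h22 : (2:Int) ^ (0 + 1) = 2 := by norm_num
    have h20 : (2:Int) ^ 0 = 1 := by norm_num
    rw [validB, dif_pos (by omega)]
    have hno : ¬ ∃ i : Int, lo ≤ i ∧ i < lo + 2 ^ (0 + 1) - 1 ∧ cAt s i = '1' := by
      rintro ⟨i, a, b, c⟩
      have hle : lo + 2 ^ 0 - 1 = lo := by omega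
      rw [hle] at hroot
      rw [show i = lo from by omega] at c
      exact hroot c
    have hcon := contains_slice_iff s lo (lo + 2 ^ (0 + 1) - 1) h0 h1 (by omega)
    rcases hb2 : (PySem.List.slice s (some lo) (some (lo + 2 ^ (0 + 1) - 1))).contains '1' with _ | _
    · rfl
    · exact absurd (hcon.mp hb2) hno
  · -- internal node with a non-'1' root: the else branch is taken
    rw [validB]
    have h4 : (4:Int) ≤ 2 ^ (k + 1 + 1) := by
      calc (4:Int) = 2 ^ 2 := by norm_num
      _ ≤ 2 ^ (k + 1 + 1) := by apply pow_le_pow_right₀ <;> omega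
    have hb : ¬ (lo + 2 ^ (k + 1 + 1) - 1 - lo ≤ 1) := by omega
    rw [dif_neg hb]
    have hmid : PySem.Int.floordiv (lo + (lo + 2 ^ (k + 1 + 1) - 1)) 2 = lo + 2 ^ (k + 1) - 1 := by
      rw [PySem.Int.floordiv_eq_iff_of_pos (by omega)]
      have hsplit : (2:Int) ^ (k + 1 + 1) = 2 ^ (k + 1) * 2 := by ring
      omega
    rw [hmid, if_neg hroot]

-- the key per-parent step: A's local check + recursion into children = B's validB on the parent range
theorem validB_step (s : List Char) (d : Nat) (p : Int)
    (h1 : 2 ^ (d + 1) ≤ p) (h2 : p + 2 ^ (d + 1) ≤ (s.length : Int) + 1) :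
    validB s (p - 2 ^ (d + 1)) (p + 2 ^ (d + 1) - 1)
      = (if cAt s (p - 1) = '1'
         then validB s (p - 2 ^ (d + 1)) (p - 1) && validB s p (p + 2 ^ (d + 1) - 1)
         else if cAt s (p - 2 ^ d - 1) = '1' ∨ cAt s (p + 2 ^ d - 1) = '1' then false
         else validB s (p - 2 ^ (d + 1)) (p - 1) && validB s p (p + 2 ^ (d + 1) - 1)) := by
  have hpow : (2:Int) ^ (d + 1) = 2 ^ d + 2 ^ d := by ring
  have hpd : (0:Int) < 2 ^ d := by positivity
  rw [validB]
  have hb : ¬ (p + 2 ^ (d + 1) - 1 - (p - 2 ^ (d + 1)) ≤ 1) := by omega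
  rw [dif_neg hb]
  have hmid : PySem.Int.floordiv ((p - 2 ^ (d + 1)) + (p + 2 ^ (d + 1) - 1)) 2 = p - 1 := by
    rw [PySem.Int.floordiv_eq_iff_of_pos (by omega)]
    omega
  rw [hmid]
  simp only [Int.sub_add_cancel]
  by_cases hroot : cAt s (p - 1) = '1'
  · rw [if_pos hroot, if_pos hroot]
  · rw [if_neg hroot, if_neg hroot]
    -- rewrite both children via validB_notone: left child root is p - 2^d, right child root is p + 2^d
    have hL := validB_notone s d (p - 2 ^ (d + 1)) (by omega) (by omega)
    have hR := validB_notone s d p (by omega) (by omega)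
    have hLroot : p - 2 ^ (d + 1) + 2 ^ d - 1 = p - 2 ^ d - 1 := by omega
    have hLhi : p - 2 ^ (d + 1) + 2 ^ (d + 1) - 1 = p - 1 := by omega
    rw [hLroot, hLhi] at hL
    by_cases hkids : cAt s (p - 2 ^ d - 1) = '1' ∨ cAt s (p + 2 ^ d - 1) = '1'
    · rw [if_pos hkids]
      -- the whole range contains the offending '1' child
      have hex : ∃ i : Int, p - 2 ^ (d + 1) ≤ i ∧ i < p + 2 ^ (d + 1) - 1 ∧ cAt s i = '1' := by
        rcases hkids with hk | hk
        · exact ⟨p - 2 ^ d - 1, by omega, by omega, hk⟩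
        · exact ⟨p + 2 ^ d - 1, by omega, by omega, hk⟩
      rw [(contains_slice_iff s _ _ (by omega) (by omega) (by omega)).mpr hex]
      rfl
    · push_neg at hkids
      rw [if_neg (by tauto)]
      rw [hL hkids.1, hR hkids.2]
      -- both sides say "no '1' anywhere in [p - 2^(d+1), p + 2^(d+1) - 1)"
      have hCw := contains_slice_iff s (p - 2 ^ (d + 1)) (p + 2 ^ (d + 1) - 1) (by omega) (by omega) (by omega)
      have hCl := contains_slice_iff s (p - 2 ^ (d + 1)) (p - 1) (by omega) (by omega) (by omega)
      have hCr := contains_slice_iff s p (p + 2 ^ (d + 1) - 1) (by omega) (by omega) (by omega)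
      rcases hw : (PySem.List.slice s (some (p - 2 ^ (d + 1))) (some (p + 2 ^ (d + 1) - 1))).contains '1' with _ | _
      · -- no '1' in the whole range: neither half contains one
        have hnone : ¬ ∃ i : Int, p - 2 ^ (d + 1) ≤ i ∧ i < p + 2 ^ (d + 1) - 1 ∧ cAt s i = '1' := by
          intro hex; rw [← hCw] at hex; rw [hex] at hw; cases hw
        have hl : (PySem.List.slice s (some (p - 2 ^ (d + 1))) (some (p - 1))).contains '1' = false := by
          rcases hl' : (PySem.List.slice s (some (p - 2 ^ (d + 1))) (some (p - 1))).contains '1' with _ | _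
          · rfl
          · obtain ⟨i, a, b, c⟩ := hCl.mp hl'
            exact absurd ⟨i, a, by omega, c⟩ hnone
        have hr : (PySem.List.slice s (some p) (some (p + 2 ^ (d + 1) - 1))).contains '1' = false := by
          rcases hr' : (PySem.List.slice s (some p) (some (p + 2 ^ (d + 1) - 1))).contains '1' with _ | _
          · rfl
          · obtain ⟨i, a, b, c⟩ := hCr.mp hr'
            exact absurd ⟨i, by omega, by omega, c⟩ hnone
        rw [hl, hr]
        simp
      · -- a '1' somewhere in the whole range: it is not the root, so it is in a half
        obtain ⟨i, a, b, c⟩ := hCw.mp hw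
        have hne : i ≠ p - 1 := by intro h; subst h; exact hroot c
        have hhalf : (PySem.List.slice s (some (p - 2 ^ (d + 1))) (some (p - 1))).contains '1' = true
            ∨ (PySem.List.slice s (some p) (some (p + 2 ^ (d + 1) - 1))).contains '1' = true := by
          by_cases hi : i < p - 1
          · exact Or.inl (hCl.mpr ⟨i, a, by omega, c⟩)
          · exact Or.inr (hCr.mpr ⟨i, by omega, by omega, c⟩)
        rcases hhalf with hh | hh <;> rw [hh] <;> simp

-- the main invariant: A's level loop from depth d+1 computes the conjunction of validB over the frontier
theorem loopA_eq (d : Nat) (s : List Char) : ∀ parents : List Int,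
    (∀ p ∈ parents, 2 ^ d ≤ p ∧ p + 2 ^ d ≤ (s.length : Int) + 1) →
    loopA (d + 1) s parents
      = if parents.all (fun p => validB s (p - 2 ^ d) (p + 2 ^ d - 1)) then 1 else 0 := by
  induction d with
  | zero =>
    intro parents _
    have hall : parents.all (fun p => validB s (p - 2 ^ 0) (p + 2 ^ 0 - 1)) = true := by
      rw [List.all_eq_true]
      intro p _
      rw [validB]
      have hle1 : p + 2 ^ 0 - 1 - (p - 2 ^ 0) ≤ 1 := by norm_num
      rw [dif_pos hle1]
    rw [hall, if_pos rfl]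
    rfl
  | succ d ih =>
    intro parents hp
    have hpow : (2:Int) ^ (d + 1) = 2 ^ d + 2 ^ d := by ring
    have hpd : (0:Int) < 2 ^ d := by positivity
    simp only [loopA]
    rw [levelA_char]
    by_cases hok : parents.all (fun p => (cAt s (p - 1) == '1')
        || (!(cAt s (p - (2:Int)^d - 1) == '1') && !(cAt s (p + (2:Int)^d - 1) == '1'))) = true
    · rw [if_pos hok]
      show loopA (d + 1) s (List.flatMap (fun p => [p - (2:Int)^d, p + (2:Int)^d]) parents)
        = if (parents.all fun p => validB s (p - 2 ^ (d + 1)) (p + 2 ^ (d + 1) - 1)) = true then 1 else 0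
      have hbounds : ∀ q ∈ parents.flatMap (fun p => [p - (2:Int)^d, p + (2:Int)^d]),
          2 ^ d ≤ q ∧ q + 2 ^ d ≤ (s.length : Int) + 1 := by
        intro q hq
        rw [List.mem_flatMap] at hq
        obtain ⟨p, hpmem, hq⟩ := hq
        have hb := hp p hpmem
        simp only [List.mem_cons, List.mem_singleton, List.not_mem_nil, or_false] at hq
        rcases hq with rfl | rfl
        · constructor <;> omega
        · constructor <;> omega
      rw [ih _ hbounds, List.all_flatMap]
      rw [List.all_eq_true] at hok
      have hcong : parents.all (fun p => ([p - (2:Int)^d, p + (2:Int)^d]).all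
            (fun q => validB s (q - 2 ^ d) (q + 2 ^ d - 1)))
          = parents.all (fun p => validB s (p - 2 ^ (d+1)) (p + 2 ^ (d+1) - 1)) := by
        apply all_congr_mem
        intro p hpmem
        have hb := hp p hpmem
        have hstep := validB_step s d p (by omega) (by omega)
        have hokp := hok p hpmem
        simp only [Bool.or_eq_true, Bool.and_eq_true, Bool.not_eq_true', beq_iff_eq,
          beq_eq_false_iff_ne, ne_eq] at hokp
        simp only [List.all_cons, List.all_nil, Bool.and_true]
        have hLlo : p - (2:Int)^d - 2 ^ d = p - 2 ^ (d + 1) := by omega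
        have hLhi : p - (2:Int)^d + 2 ^ d - 1 = p - 1 := by omega
        have hRlo : p + (2:Int)^d - 2 ^ d = p := by omega
        have hRhi : p + (2:Int)^d + 2 ^ d - 1 = p + 2 ^ (d + 1) - 1 := by omega
        rw [hLlo, hLhi, hRlo, hRhi]
        rcases hokp with hc1 | ⟨hc2, hc3⟩
        · rw [hstep, if_pos hc1]
        · rw [hstep]
          by_cases hc1 : cAt s (p - 1) = '1'
          · rw [if_pos hc1]
          · rw [if_neg hc1, if_neg (by tauto)]
      rw [hcong]
    · rw [if_neg hok]
      -- some parent fails A's local check: B's validB on that parent's range is false too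
      rw [List.all_eq_true] at hok
      push_neg at hok
      obtain ⟨p, hpmem, hfail⟩ := hok
      simp only [Bool.or_eq_true, Bool.and_eq_true, Bool.not_eq_true', beq_iff_eq,
        beq_eq_false_iff_ne, ne_eq, not_or, not_and_or, not_not] at hfail
      have hb := hp p hpmem
      obtain ⟨hn1, hkids⟩ := hfail
      have hstep := validB_step s d p (by omega) (by omega)
      have hfalse : validB s (p - 2 ^ (d + 1)) (p + 2 ^ (d + 1) - 1) = false := by
        rw [hstep, if_neg hn1, if_pos hkids]
      have hallf : parents.all (fun q => validB s (q - 2 ^ (d+1)) (q + 2 ^ (d+1) - 1)) = false := by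
        rcases hall : parents.all (fun q => validB s (q - 2 ^ (d+1)) (q + 2 ^ (d+1) - 1)) with _ | _
        · rfl
        · rw [List.all_eq_true] at hall
          have := hall p hpmem
          rw [hfalse] at this
          cases this
      rw [hallf]
      rfl

-- both ports compute the same padding depth
theorem clog_eq_bitLength (L : Nat) (hL : 1 ≤ L) :
    Nat.clog 2 (L + 1) = PySem.Int.bitLength (L : Int) := by
  set B := PySem.Int.bitLength (L : Int) with hB
  have hlt : L < 2 ^ B := by
    have := PySem.Int.lt_two_pow_bitLength (L : Int)
    simpa using this
  have hge : 2 ^ (B - 1) ≤ L := by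
    have := PySem.Int.two_pow_bitLength_le (L : Int) (by exact_mod_cast (by omega : L ≠ 0))
    simpa using this
  have hB1 : 1 ≤ B := by
    by_contra hcon
    push_neg at hcon
    interval_cases B
    omega
  apply le_antisymm
  · rw [Nat.clog_le_iff_le_pow (by omega)]
    omega
  · by_contra hcon
    push_neg at hcon
    have h2 : Nat.clog 2 (L + 1) ≤ B - 1 := by omega
    rw [Nat.clog_le_iff_le_pow (by omega)] at h2
    omega

-- per-number equality
theorem checkA_eq_checkB (bn : List Char) (hbn : 0 < bn.length) : checkA bn = checkB bn := by
  show loopA (Nat.clog 2 (bn.length + 1))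
      (if bn.length ≠ 2 ^ (Nat.clog 2 (bn.length + 1)) - 1
       then List.replicate (2 ^ (Nat.clog 2 (bn.length + 1)) - 1 - bn.length) '0' ++ bn else bn)
      [((2:Int) ^ ((Nat.clog 2 (bn.length + 1)) - 1))]
    = (if validB (List.replicate (2 ^ (PySem.Int.bitLength (bn.length : Int)) - 1 - bn.length) '0' ++ bn) 0
          (((List.replicate (2 ^ (PySem.Int.bitLength (bn.length : Int)) - 1 - bn.length) '0' ++ bn).length : Int))
       then 1 else 0)
  rw [← clog_eq_bitLength bn.length hbn]
  set D := Nat.clog 2 (bn.length + 1) with hD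
  have hle : bn.length ≤ 2 ^ D - 1 := by
    have h2 : bn.length + 1 ≤ 2 ^ D := by
      rw [← Nat.clog_le_iff_le_pow (by omega)]
    omega
  have hpad : (if bn.length ≠ 2 ^ D - 1 then List.replicate (2 ^ D - 1 - bn.length) '0' ++ bn else bn)
      = List.replicate (2 ^ D - 1 - bn.length) '0' ++ bn := by
    split_ifs with hifp
    · rfl
    · rw [not_ne_iff.mp hifp]; simp
  rw [hpad]
  set s := List.replicate (2 ^ D - 1 - bn.length) '0' ++ bn with hs
  have hlen : s.length = 2 ^ D - 1 := by
    rw [hs, List.length_append, List.length_replicate]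
    omega
  have hD1 : 1 ≤ D := by
    rw [hD]
    exact Nat.clog_pos (by omega) (by omega)
  obtain ⟨d, hDd⟩ : ∃ d, D = d + 1 := ⟨D - 1, by omega⟩
  have hpowN : (1:Nat) ≤ 2 ^ d := Nat.one_le_two_pow
  have hpowI : ((2:Int) ^ (d+1)) = 2 ^ d + 2 ^ d := by ring
  have hlenI : (s.length : Int) = 2 ^ (d + 1) - 1 := by
    rw [hlen, hDd, Nat.cast_sub Nat.one_le_two_pow]
    push_cast
    ring
  have hbounds : ∀ p ∈ [((2:Int) ^ d)], 2 ^ d ≤ p ∧ p + 2 ^ d ≤ (s.length : Int) + 1 := by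
    intro p hpm
    simp only [List.mem_singleton] at hpm
    subst hpm
    refine ⟨le_refl _, ?_⟩
    rw [hlenI]; omega
  have hAd : D - 1 = d := by omega
  rw [hAd, hDd]
  rw [loopA_eq d s [((2:Int) ^ d)] hbounds]
  have he1 : ((2:Int) ^ d) - 2 ^ d = 0 := by omega
  have he2 : ((2:Int) ^ d) + 2 ^ d - 1 = (s.length : Int) := by rw [hlenI]; omega
  simp only [List.all_cons, List.all_nil, Bool.and_true, he1, he2]

-- toDigitsCore never shrinks a nonempty accumulator to the empty list
theorem toDigitsCore_ne_nil (b : Nat) : ∀ (f n : Nat) (l : List Char), l ≠ [] → Nat.toDigitsCore b f n l ≠ [] := by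
  intro f
  induction f with
  | zero =>
    intro n l hl
    exact hl
  | succ f ih =>
    intro n l hl
    rw [Nat.toDigitsCore]
    split_ifs with hz
    · simp
    · exact ih (n / b) _ (by simp)

-- Nat.toDigits never returns the empty list
theorem toDigits_ne_nil (b n : Nat) : Nat.toDigits b n ≠ [] := by
  unfold Nat.toDigits
  rw [Nat.toDigitsCore]
  split_ifs with hz
  · simp
  · exact toDigitsCore_ne_nil b n (n / b) _ (by simp)

-- bin(n)[2:] is never empty
theorem binTail_ne_nil (n : Int) : 0 < (binTail n).length := by
  unfold binTail
  rw [show (2:Int) = ((2:Nat):Int) from rfl, PySem.List.slice_from_natCast]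
  unfold PySem.Int.toBinChars0b
  split_ifs with hneg
  · simp
  · simp only [List.drop_succ_cons, List.drop_zero]
    exact List.length_pos_iff.mpr (toDigits_ne_nil 2 n.toNat)

-- ===== VERDICT (by name: the statement is the Claim_ definition above) =====
theorem solution_spec : Claim_equal_solution := by
  intro numbers _
  unfold Spec_solution solution solution_alt
  apply List.map_congr_left
  intro n _
  exact checkA_eq_checkB (binTail n) (binTail_ne_nil n)
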